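-- pv_equiv track=rewrite | github.com/ioi-germany/cms | cmscontrib/gerpythonformat/ConstraintParser.py | grp
-- ===== SOURCE A (Python) =====
-- def grp(s):
--     """
--     Group s into blocks of three characters each, separated by 1/6th quad
--     This should be applied to numbers
--     """
--     m = len(s) % 3
--
--     t = ""
--     for i in range(0, len(s)):
--         if (i + 3 - m) % 3 == 0 and i != 0:
--             t += "\,"
--         t += s[i]
--     return t
-- ===== SOURCE B (Python) =====
-- def grp(s):
--     """
--     Group s into blocks of three characters each, separated by 1/6th quad
--     This should be applied to numbers
--     """
--     m = len(s) % 3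
--     chunks = ([s[:m]] if m else []) + [s[i:i + 3] for i in range(m, len(s), 3)]
--     return "\,".join(chunks)
-- ===== Notes on version B (the rewrite author's own statement) =====
-- stated objective: simpler
-- what changed: Replaces the per-character loop with a modular separator test on each index by block-wise slicing into 3-char chunks joined once with the separator.
import Mathlib
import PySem

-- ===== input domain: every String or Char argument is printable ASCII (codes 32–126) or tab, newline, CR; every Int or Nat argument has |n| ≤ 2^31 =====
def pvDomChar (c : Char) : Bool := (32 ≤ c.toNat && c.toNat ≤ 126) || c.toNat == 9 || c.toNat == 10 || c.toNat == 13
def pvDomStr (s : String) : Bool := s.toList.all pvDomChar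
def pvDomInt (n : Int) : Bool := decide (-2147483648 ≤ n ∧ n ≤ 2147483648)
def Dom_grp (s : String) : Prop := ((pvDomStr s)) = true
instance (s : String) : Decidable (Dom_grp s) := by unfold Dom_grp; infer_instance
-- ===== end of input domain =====

-- B replaces the per-character loop (separator decided by a modular test on each index)
-- with block-wise slicing into 3-character chunks joined with "\,": simpler decomposition.

-- the two-character Python string "\," (backslash, comma)
def grpSep : List Char := ['\\', ',']

-- ===== PORT A =====
def grpLoopA (cs : List Char) : List Char :=
  let m : Int := PySem.Int.mod (cs.length : Int) 3
  (PySem.List.pyRange 0 (cs.length : Int) 1).foldl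
    (fun t i =>
      (if PySem.Int.mod (i + 3 - m) 3 = 0 ∧ i ≠ 0 then t ++ grpSep else t)
        ++ [PySem.List.pyGetD cs i ' ']) []

def grp (s : String) : String := String.ofList (grpLoopA s.toList)

-- ===== PORT B =====
def grpChunksB (cs : List Char) : List (List Char) :=
  let m : Int := PySem.Int.mod (cs.length : Int) 3
  (if m = 0 then [] else [PySem.List.slice cs (some 0) (some m)])
    ++ (PySem.List.pyRange m (cs.length : Int) 3).map
        (fun i => PySem.List.slice cs (some i) (some (i + 3)))

def grp_alt (s : String) : String :=
  String.ofList (PySem.Chars.join grpSep (grpChunksB s.toList))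

-- ===== PRECONDITION & SPEC =====
def Spec_grp (s : String) (out : String) : Prop := out = grp_alt s
instance (s : String) (out : String) : Decidable (Spec_grp s out) := by unfold Spec_grp; infer_instance

-- ===== CLAIM (what is proved, stated in full; the proofs are below) =====
def Claim_equal_grp : Prop := ∀ (s : String), Dom_grp s → Spec_grp s (grp s)

-- ===== LEMMAS AND PROOFS =====

-- join over l ++ [c]
theorem grp_join_append (sep c : List Char) (l : List (List Char)) :
    PySem.Chars.join sep (l ++ [c]) =
      PySem.Chars.join sep l ++ (if l = [] then [] else sep) ++ c := by
  induction l with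
  | nil => simp [PySem.Chars.join_nil, PySem.Chars.join_singleton]
  | cons p rest ih =>
    cases rest with
    | nil => simp [PySem.Chars.join_singleton, PySem.Chars.join_cons_cons]
    | cons q rest' =>
      simp only [List.cons_append] at ih ⊢
      rw [PySem.Chars.join_cons_cons, ih, PySem.Chars.join_cons_cons]
      simp

theorem grp_pyRange3_split (a b : Int) (h3 : a + 3 ≤ b) (hd : (3:Int) ∣ b - a) :
    PySem.List.pyRange a b 3 = PySem.List.pyRange a (b-3) 3 ++ [b-3] := by
  obtain ⟨k, hk⟩ := hd
  rw [PySem.List.pyRange_of_pos a b (by norm_num),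
      PySem.List.pyRange_of_pos a (b-3) (by norm_num)]
  by_cases h : a < b - 3
  · have h1 : a < b := by omega
    have c1 : ((b - a + 3 - 1) / 3).toNat = k.toNat := by omega
    have c2 : ((b - 3 - a + 3 - 1) / 3).toNat = k.toNat - 1 := by omega
    have hk1 : 1 ≤ k.toNat := by omega
    simp only [h1, h, if_pos, c1, c2]
    rw [show k.toNat = (k.toNat - 1) + 1 by omega, List.range_succ, List.map_append]
    simp only [List.map_cons, List.map_nil]
    congr 2
    omega
  · have hb : b = a + 3 := by omega
    have h1 : a < b := by omega
    simp only [h1, if_pos, if_neg h]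
    have c1 : ((b - a + 3 - 1) / 3).toNat = 1 := by omega
    rw [c1]
    simp
    omega


theorem grp_A_step (p : List Char) (x y z : Char) :
    grpLoopA (p ++ [x, y, z]) =
      grpLoopA p ++ (if p = [] then [] else grpSep) ++ [x, y, z] := by
  simp only [grpLoopA, List.length_append, List.length_cons, List.length_nil]
  have hm : PySem.Int.mod ((p.length + 3 : Nat) : Int) 3 = PySem.Int.mod (p.length : Int) 3 := by
    rw [PySem.Int.mod_eq_emod_of_pos (by norm_num), PySem.Int.mod_eq_emod_of_pos (by norm_num)]
    omega
  have hmval : PySem.Int.mod (p.length : Int) 3 = ((p.length % 3 : Nat) : Int) := by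
    rw [PySem.Int.mod_eq_emod_of_pos (by norm_num)]
    omega
  rw [hm]
  rw [show ((p.length + 0 + (1 + (1 + 1)) : Nat) : Int) = (p.length : Int) + 3 by push_cast; ring]
  rw [PySem.List.pyRange_one_append 0 (p.length : Int) ((p.length : Int) + 3) (by positivity) (by omega)]
  rw [List.foldl_append]
  rw [show PySem.List.pyRange (p.length : Int) ((p.length : Int) + 3) 1
        = [(p.length : Int), (p.length : Int) + 1, (p.length : Int) + 2] by
    rw [PySem.List.pyRange_one_cons (by omega), PySem.List.pyRange_one_cons (by omega),
        PySem.List.pyRange_one_cons (by omega), PySem.List.pyRange_one_eq_nil (by omega)]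
    norm_num
    omega]
  simp only [List.foldl_cons, List.foldl_nil]
  have g0 : PySem.List.pyGetD (p ++ [x, y, z]) (p.length : Int) ' ' = x := by
    simp [PySem.List.pyGetD]
  have g1 : PySem.List.pyGetD (p ++ [x, y, z]) ((p.length : Int) + 1) ' ' = y := by
    have h := PySem.List.pyGet?_append_right p [x, y, z] 1
    norm_num at h
    simp [PySem.List.pyGetD, h]
  have g2 : PySem.List.pyGetD (p ++ [x, y, z]) ((p.length : Int) + 2) ' ' = z := by
    have h := PySem.List.pyGet?_append_right p [x, y, z] 2
    norm_num at h
    simp [PySem.List.pyGetD, h]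
  rw [g0, g1, g2]
  rw [hmval]
  rw [if_neg (by
        rw [PySem.Int.mod_eq_zero_iff_dvd]
        intro hcon
        have h1 := hcon.1
        have h2 : p.length % 3 ≤ p.length := Nat.mod_le _ _
        omega)]
  rw [if_neg (by
        rw [PySem.Int.mod_eq_zero_iff_dvd]
        intro hcon
        have h1 := hcon.1
        have h2 : p.length % 3 ≤ p.length := Nat.mod_le _ _
        omega)]
  have hfold : List.foldl
        (fun t i =>
          (if PySem.Int.mod (i + 3 - ((p.length % 3 : Nat) : Int)) 3 = 0 ∧ i ≠ 0 then t ++ grpSep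
           else t) ++ [PySem.List.pyGetD (p ++ [x, y, z]) i ' ']) []
        (PySem.List.pyRange 0 (p.length : Int) 1)
      = List.foldl
        (fun t i =>
          (if PySem.Int.mod (i + 3 - ((p.length % 3 : Nat) : Int)) 3 = 0 ∧ i ≠ 0 then t ++ grpSep
           else t) ++ [PySem.List.pyGetD p i ' ']) []
        (PySem.List.pyRange 0 (p.length : Int) 1) := by
    refine PySem.List.foldl_congr_mem _ _ _ _ ?_
    intro acc i hi
    rw [PySem.List.mem_pyRange_one] at hi
    have hget : PySem.List.pyGetD (p ++ [x, y, z]) i ' ' = PySem.List.pyGetD p i ' ' := by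
      rw [PySem.List.pyGetD_eq_getElem (p ++ [x, y, z]) ' ' (by omega) (by simp; omega),
          PySem.List.pyGetD_eq_getElem p ' ' (by omega) (by omega)]
      exact List.getElem_append_left _
    rw [hget]
  by_cases hp : p = []
  · subst hp
    simp [PySem.List.pyRange_one_eq_nil, PySem.Int.mod]
  · rw [if_pos (by
        refine ⟨?_, ?_⟩
        · rw [PySem.Int.mod_eq_zero_iff_dvd]
          have h2 : p.length % 3 ≤ p.length := Nat.mod_le _ _
          omega
        · have h0 : p.length ≠ 0 := by simpa [List.length_eq_zero_iff] using hp
          intro hcon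
          omega), if_neg hp, hfold]
    simp

theorem grp_B_step (p : List Char) (x y z : Char) :
    grpChunksB (p ++ [x, y, z]) = grpChunksB p ++ [[x, y, z]] := by
  simp only [grpChunksB, List.length_append, List.length_cons, List.length_nil]
  have hm : PySem.Int.mod ((p.length + 0 + (1 + (1 + 1)) : Nat) : Int) 3
      = PySem.Int.mod (p.length : Int) 3 := by
    rw [PySem.Int.mod_eq_emod_of_pos (by norm_num), PySem.Int.mod_eq_emod_of_pos (by norm_num)]
    omega
  have hmval : PySem.Int.mod (p.length : Int) 3 = ((p.length % 3 : Nat) : Int) := by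
    rw [PySem.Int.mod_eq_emod_of_pos (by norm_num)]
    omega
  have hmle : p.length % 3 ≤ p.length := Nat.mod_le _ _
  rw [hm, hmval]
  rw [show ((p.length + 0 + (1 + (1 + 1)) : Nat) : Int) = (p.length : Int) + 3 by push_cast; ring]
  rw [grp_pyRange3_split _ _ (by omega) (by
        refine ⟨(p.length / 3 : Nat) + 1, ?_⟩
        push_cast
        omega)]
  rw [show ((p.length : Int) + 3 - 3) = ((p.length : Nat) : Int) by ring]
  rw [List.map_append]
  have hhead : (if ((p.length % 3 : Nat) : Int) = 0 then ([] : List (List Char))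
        else [PySem.List.slice (p ++ [x, y, z]) (some 0) (some ((p.length % 3 : Nat) : Int))])
      = (if ((p.length % 3 : Nat) : Int) = 0 then ([] : List (List Char))
        else [PySem.List.slice p (some 0) (some ((p.length % 3 : Nat) : Int))]) := by
    split_ifs with h
    · rfl
    · rw [show (some (0:Int)) = some ((0:Nat):Int) by norm_num,
          PySem.List.slice_natCast, PySem.List.slice_natCast]
      simp only [Nat.sub_zero, List.drop_zero]
      rw [List.take_append_of_le_length hmle]
  have hmap : (PySem.List.pyRange ((p.length % 3 : Nat) : Int) (p.length : Int) 3).map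
        (fun i => PySem.List.slice (p ++ [x, y, z]) (some i) (some (i + 3)))
      = (PySem.List.pyRange ((p.length % 3 : Nat) : Int) (p.length : Int) 3).map
        (fun i => PySem.List.slice p (some i) (some (i + 3))) := by
    refine List.map_congr_left ?_
    intro i hi
    rw [PySem.List.mem_pyRange_iff_of_pos (by norm_num)] at hi
    obtain ⟨hi1, hi2, hi3⟩ := hi
    have hle : i ≤ (p.length : Int) - 3 := by omega
    rw [PySem.List.slice_toNat _ (by omega) (by omega),
        PySem.List.slice_toNat _ (by omega) (by omega)]
    rw [List.drop_append_of_le_length (by omega)]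
    rw [List.take_append_of_le_length (by simp; omega)]
  have hlast : PySem.List.slice (p ++ [x, y, z]) (some ((p.length : Nat) : Int))
        (some (((p.length : Nat) : Int) + 3)) = [x, y, z] := by
    rw [show (((p.length : Nat) : Int) + 3) = (((p.length + 3 : Nat)) : Int) by push_cast; ring,
        PySem.List.slice_natCast]
    rw [show p.length + 3 - p.length = 3 by omega]
    rw [List.drop_left]
    rfl
  rw [hhead, hmap]
  simp only [List.map_cons, List.map_nil]
  rw [hlast, List.append_assoc]

theorem grp_chunks_nil : grpChunksB [] = [] := rfl

theorem grp_chunks_ne_nil (p : List Char) (hp : p ≠ []) : grpChunksB p ≠ [] := by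
  have hL : 1 ≤ p.length := List.length_pos_iff.2 hp
  simp only [grpChunksB]
  by_cases hm0 : PySem.Int.mod (p.length : Int) 3 = 0
  · rw [if_pos hm0, List.nil_append]
    intro h
    have h0 : (0 : Int) ∈ PySem.List.pyRange (PySem.Int.mod (p.length : Int) 3) (p.length : Int) 3 := by
      rw [hm0, PySem.List.mem_pyRange_iff_of_pos (by norm_num)]
      refine ⟨le_refl _, by omega, by omega⟩
    rw [List.map_eq_nil_iff.mp h] at h0
    exact absurd h0 (List.not_mem_nil)
  · rw [if_neg hm0]
    simp

theorem grp_main (cs : List Char) : grpLoopA cs = PySem.Chars.join grpSep (grpChunksB cs) := by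
  suffices H : ∀ (n : Nat) (l : List Char), l.length = n →
      grpLoopA l = PySem.Chars.join grpSep (grpChunksB l) from H cs.length cs rfl
  intro n
  induction n using Nat.strong_induction_on with
  | _ n ih =>
    intro l hlen
    by_cases h3 : l.length < 3
    · rcases l with _ | ⟨a, _ | ⟨b, _ | ⟨c, t⟩⟩⟩
      · rfl
      · simp [grpLoopA, grpChunksB, PySem.List.pyRange, PySem.Chars.join, List.intercalate,
              PySem.List.slice, PySem.List.pyGetD, PySem.Int.mod, PySem.List.clampIdx]
      · simp [grpLoopA, grpChunksB, PySem.List.pyRange, PySem.Chars.join, List.intercalate,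
              PySem.List.slice, PySem.List.pyGetD, PySem.Int.mod, PySem.List.clampIdx,
              List.range_succ, PySem.List.pyGet?, PySem.List.pyIdx?]
      · exfalso
        simp at h3
        omega
    · obtain ⟨x, y, z, hxyz⟩ := List.length_eq_three.mp (by simp; omega :
        (l.drop (l.length - 3)).length = 3)
      have hcs : l = l.take (l.length - 3) ++ [x, y, z] := by
        conv_lhs => rw [← List.take_append_drop (l.length - 3) l]
        rw [hxyz]
      rw [hcs, grp_A_step, grp_B_step, grp_join_append]
      rw [ih (l.take (l.length - 3)).length (by simp; omega) _ rfl]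
      by_cases hp : l.take (l.length - 3) = []
      · rw [hp, grp_chunks_nil, if_pos rfl, if_pos rfl]
      · rw [if_neg hp, if_neg (grp_chunks_ne_nil _ hp)]

-- ===== VERDICT (by name: the statement is the Claim_ definition above) =====
theorem grp_spec : Claim_equal_grp := by
  intro s _
  unfold Spec_grp grp grp_alt
  exact congrArg String.ofList (grp_main s.toList)
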